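-- pv_equiv track=rewrite | github.com/owlright/graph-match | inc/algorithms/tree/irs_based.py | get_stage_server
-- ===== SOURCE A (Python) =====
-- def hamming_distance(a, b):
--   count = 0
--   for i, j in zip(a, b):
--     if i != j:
--       count += 1
--   return count
--
-- def get_stage_server(S:list, r:tuple) -> dict:
--   hop_server = {}
--   for s in S:
--     dist = hamming_distance(s, r)
--     hop_server[dist] = hop_server.get(dist, []) + [s]
--   hop_server = dict(sorted(hop_server.items(), key=lambda x:x[0], reverse=True))
--   d = next(iter(hop_server)) # the max stage, d <= k+1
--   for j in range(d, -1, -1):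
--     hop_server[j] = hop_server.get(j, [])
--   hop_server[0] = [r]
--   return hop_server
-- ===== SOURCE B (Python) =====
-- def hamming_distance(a, b):
--     return sum(1 for i, j in zip(a, b) if i != j)
--
-- def get_stage_server(S: list, r: tuple) -> dict:
--     dists = [hamming_distance(s, r) for s in S]
--     dset = set(dists)
--     present = sorted(dset, reverse=True)
--     d = present[0]
--     keys = present + [j for j in range(d, -1, -1) if j not in dset]
--     return {k: ([r] if k == 0 else [s for s, dist in zip(S, dists) if dist == k]) for k in keys}
-- ===== Notes on version B (the rewrite author's own statement) =====
-- stated objective: alternative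
-- what changed: Replaces A's single-pass dict bucketing plus descending gap-fill insertion loop with a direct construction: compute all distances once, take the sorted distinct distances (descending) plus the missing hops as the key list, and build each bucket by filtering the precomputed (server, distance) pairs per key.
import Mathlib
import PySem

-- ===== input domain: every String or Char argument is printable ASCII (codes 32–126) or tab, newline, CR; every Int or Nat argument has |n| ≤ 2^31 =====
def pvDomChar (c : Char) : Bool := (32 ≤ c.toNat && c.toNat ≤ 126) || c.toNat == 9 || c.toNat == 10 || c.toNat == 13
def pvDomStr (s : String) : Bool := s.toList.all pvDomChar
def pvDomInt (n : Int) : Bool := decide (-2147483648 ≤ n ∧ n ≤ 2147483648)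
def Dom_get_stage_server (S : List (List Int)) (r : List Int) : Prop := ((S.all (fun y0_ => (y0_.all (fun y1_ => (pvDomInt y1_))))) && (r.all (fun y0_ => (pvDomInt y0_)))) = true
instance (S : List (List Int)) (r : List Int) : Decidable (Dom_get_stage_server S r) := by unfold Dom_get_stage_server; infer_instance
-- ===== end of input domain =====

-- B builds the result directly: sorted distinct distances (descending) plus missing hops as the
-- key list, each bucket obtained by filtering S per key — instead of A's dict bucketing + gap-fill.


-- ===== PORT A =====
def hamming_distance (a b : List Int) : Int :=
  (a.zip b).foldl (fun count p => if p.1 ≠ p.2 then count + 1 else count) 0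

def get_stage_server (S : List (List Int)) (r : List Int) : List (Int × List (List Int)) :=
  -- hop_server[dist] = hop_server.get(dist, []) + [s]
  let hs0 : PySem.Dict Int (List (List Int)) :=
    S.foldl (fun d s => d.modify (hamming_distance s r) [] (· ++ [s])) PySem.Dict.empty
  -- hop_server = dict(sorted(hop_server.items(), key=lambda x: x[0], reverse=True))
  let hs1 : PySem.Dict Int (List (List Int)) :=
    PySem.Dict.ofList (PySem.List.sorted hs0.items (fun x => x.1) true)
  -- d = next(iter(hop_server))  — raises StopIteration when S = [] (excluded by Pre_)
  match hs1.keys.head? with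
  | none => []
  | some d =>
    let hs2 := (PySem.List.pyRange d (-1) (-1)).foldl (fun dd j => dd.insert j (dd.getD j [])) hs1
    (hs2.insert 0 [r]).items

-- ===== PORT B =====
def hamming_distance_alt (a b : List Int) : Int :=
  (((a.zip b).filter (fun p => p.1 != p.2)).map (fun _ => (1 : Int))).sum

def get_stage_server_alt (S : List (List Int)) (r : List Int) : List (Int × List (List Int)) :=
  let dists := S.map (fun s => hamming_distance_alt s r)
  let dset := PySem.Set.ofList dists
  let present := PySem.List.sorted dset (fun x => x) true
  -- present[0] — IndexError when S = [] (excluded by Pre_)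
  match present.head? with
  | none => []
  | some d =>
    let keys := present ++ (PySem.List.pyRange d (-1) (-1)).filter (fun j => !PySem.Set.contains dset j)
    -- dict comprehension in key order
    (keys.foldl
      (fun dd k =>
        dd.insert k (if k = 0 then [r]
          else ((S.zip dists).filter (fun p => p.2 == k)).map (fun p => p.1)))
      PySem.Dict.empty).items

-- ===== PRECONDITION & SPEC =====
-- A raises StopIteration on empty S (B raises IndexError there): excluded.
def Pre_get_stage_server (S : List (List Int)) (r : List Int) : Prop := S ≠ []
instance (S : List (List Int)) (r : List Int) : Decidable (Pre_get_stage_server S r) := by unfold Pre_get_stage_server; infer_instance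
def pvWitness_get_stage_server : List (List Int) × List Int := ([[0, 1], [1, 1]], [1, 1])

def Spec_get_stage_server (S : List (List Int)) (r : List Int) (out : List (Int × List (List Int))) : Prop := out = get_stage_server_alt S r
instance (S : List (List Int)) (r : List Int) (out : List (Int × List (List Int))) : Decidable (Spec_get_stage_server S r out) := by unfold Spec_get_stage_server; infer_instance

-- ===== CLAIM (what is proved, stated in full; the proofs are below) =====
def Claim_equal_get_stage_server : Prop := ∀ (S : List (List Int)) (r : List Int), Dom_get_stage_server S r → Pre_get_stage_server S r → Spec_get_stage_server S r (get_stage_server S r)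

-- ===== LEMMAS AND PROOFS =====

-- proof-side abbreviations (used only below)
def pvDists (S : List (List Int)) (r : List Int) : List Int :=
  S.map (fun s => hamming_distance_alt s r)

def pvBucket (S : List (List Int)) (r : List Int) (k : Int) : List (List Int) :=
  S.filter (fun s => hamming_distance_alt s r == k)

def pvPresent (S : List (List Int)) (r : List Int) : List Int :=
  PySem.List.sorted (PySem.Set.ofList (pvDists S r)) (fun x => x) true

-- filter length vs countP (specific combination used by the two distance loops)
theorem pv_len_filter (l : List (Int × Int)) (p : Int × Int → Bool) :
    (l.filter p).length = l.countP p := by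
  induction l with
  | nil => rfl
  | cons x t ih =>
    by_cases h : p x <;> simp [h, ih]

-- a sum of 1 over a filter is a countP
theorem pv_sum_ones (l : List (Int × Int)) (p : Int × Int → Bool) :
    ((l.filter p).map (fun _ => (1 : Int))).sum = (l.countP p : Int) := by
  rw [PySem.List.sum_map_const_int, pv_len_filter]
  omega

-- the two hamming distances agree
theorem pv_hd_eq (a b : List Int) : hamming_distance a b = hamming_distance_alt a b := by
  unfold hamming_distance hamming_distance_alt
  rw [PySem.List.foldl_ite_add_one (fun p : Int × Int => p.1 ≠ p.2), pv_sum_ones]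
  have : List.countP (fun x : Int × Int => decide ¬(x.1 = x.2)) (a.zip b)
      = List.countP (fun p : Int × Int => p.1 != p.2) (a.zip b) := by
    apply List.countP_congr
    intro p _
    by_cases h : p.1 = p.2 <;> simp [h]
  rw [this]; omega

theorem pv_hd_alt_nonneg (a b : List Int) : 0 ≤ hamming_distance_alt a b := by
  unfold hamming_distance_alt
  rw [PySem.List.sum_map_const_int]
  positivity

-- the bucketing fold: keys
theorem pv_hs0_keys (S : List (List Int)) (r : List Int) :
    (S.foldl (fun d s => d.modify (hamming_distance_alt s r) [] (· ++ [s]))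
      (PySem.Dict.empty : PySem.Dict Int (List (List Int)))).keys
      = PySem.Set.ofList (pvDists S r) := by
  rw [PySem.Dict.keys_foldl_modify_key S (fun s => hamming_distance_alt s r) []
      (fun _ s => (· ++ [s])) PySem.Dict.empty]
  rw [PySem.Dict.keys_empty, PySem.Set.update_nil_left, pvDists]

-- the bucketing fold: values
theorem pv_hs0_getD (S : List (List Int)) (r : List Int) (c : Int) :
    (S.foldl (fun d s => d.modify (hamming_distance_alt s r) [] (· ++ [s]))
      (PySem.Dict.empty : PySem.Dict Int (List (List Int)))).getD c []
      = pvBucket S r c := by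
  have h := PySem.Dict.getD_foldl_modify_append
    (S.map (fun s => (hamming_distance_alt s r, s)))
    (PySem.Dict.empty : PySem.Dict Int (List (List Int))) c
  rw [List.foldl_map] at h
  simpa [List.filter_map, List.map_map, Function.comp_def, pvBucket] using h

-- the bucketing fold: items
theorem pv_hs0_items (S : List (List Int)) (r : List Int) :
    (S.foldl (fun d s => d.modify (hamming_distance_alt s r) [] (· ++ [s]))
      (PySem.Dict.empty : PySem.Dict Int (List (List Int)))).items
      = (PySem.Set.ofList (pvDists S r)).map (fun k => (k, pvBucket S r k)) := by
  have hnd : (S.foldl (fun d s => d.modify (hamming_distance_alt s r) [] (· ++ [s]))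
      (PySem.Dict.empty : PySem.Dict Int (List (List Int)))).keys.Nodup := by
    rw [pv_hs0_keys]; exact PySem.Set.nodup_ofList _
  rw [PySem.Dict.items_eq_map_keys _ hnd [], pv_hs0_keys]
  apply List.map_congr_left
  intro k _
  rw [pv_hs0_getD]

-- present is strictly decreasing, hence nodup
theorem pv_present_gt (S : List (List Int)) (r : List Int) :
    (pvPresent S r).Pairwise (fun a b => b < a) := by
  have h1 := PySem.List.sorted_pairwise_rev (PySem.Set.ofList (pvDists S r)) (fun x => x)
  have h2 : (pvPresent S r).Nodup :=
    (PySem.List.sorted_perm (PySem.Set.ofList (pvDists S r)) (fun x => x) true).symm.nodup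
      (PySem.Set.nodup_ofList _)
  exact (h1.and h2).imp (fun h => lt_of_le_of_ne h.1 (Ne.symm h.2))

theorem pv_present_nodup (S : List (List Int)) (r : List Int) : (pvPresent S r).Nodup :=
  (pv_present_gt S r).imp (fun h => h.ne')

theorem pv_mem_present (S : List (List Int)) (r : List Int) (k : Int) :
    k ∈ pvPresent S r ↔ k ∈ pvDists S r := by
  rw [pvPresent, PySem.List.mem_sorted, PySem.Set.mem_ofList]

-- the sorted items list
theorem pv_sorted_items (S : List (List Int)) (r : List Int) :
    PySem.List.sorted
      ((S.foldl (fun d s => d.modify (hamming_distance_alt s r) [] (· ++ [s]))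
        (PySem.Dict.empty : PySem.Dict Int (List (List Int)))).items)
      (fun x => x.1) true
      = (pvPresent S r).map (fun k => (k, pvBucket S r k)) := by
  apply PySem.List.sorted_rev_eq_of_perm_of_pairwise_gt
  · rw [pv_hs0_items]
    exact (PySem.List.sorted_perm _ _ _).map _
  · rw [List.pairwise_map]
    exact (pv_present_gt S r).imp (fun h => h)

-- dict(pairs) with distinct keys keeps the pairs
theorem pv_ofList_items (ps : List (Int × List (List Int)))
    (h : (ps.map (fun p => p.1)).Nodup) :
    (PySem.Dict.ofList ps).items = ps := by
  have hdef : PySem.Dict.ofList ps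
      = ps.foldl (fun d p => d.insert p.1 p.2) PySem.Dict.empty := rfl
  rw [hdef]
  have hfresh : ∀ p ∈ ps,
      (PySem.Dict.empty : PySem.Dict Int (List (List Int))).contains p.1 = false :=
    fun p _ => PySem.Dict.contains_empty _
  simpa using PySem.Dict.items_foldl_insert_fresh ps (fun p => p.1) (fun p => p.2)
    PySem.Dict.empty hfresh h

-- a dict comprehension over distinct keys lists its pairs in key order
theorem pv_items_fresh (keys : List Int) (v : Int → List (List Int)) (h : keys.Nodup) :
    (keys.foldl (fun dd k => dd.insert k (v k)) PySem.Dict.empty).items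
      = keys.map (fun k => (k, v k)) := by
  have := PySem.Dict.items_foldl_insert_fresh keys (fun k => k) v PySem.Dict.empty
    (fun a _ => PySem.Dict.contains_empty a) (by simpa using h)
  simpa using this

-- an insert of the stored value is a no-op
theorem pv_insert_getD_self (dd : PySem.Dict Int (List (List Int))) (j : Int)
    (hnd : dd.keys.Nodup) (hc : dd.contains j = true) :
    dd.insert j (dd.getD j []) = dd := by
  apply PySem.Dict.ext
  rw [PySem.Dict.items_insert_of_contains dd _ hc]
  have hid : ∀ p ∈ dd.items,
      (if (p.1 == j) = true then (j, dd.getD j []) else p) = id p := by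
    intro p hp
    obtain ⟨p1, p2⟩ := p
    by_cases h : p1 = j
    · subst h
      have hv : dd.getD p1 [] = p2 := PySem.Dict.getD_of_mem_items dd hp hnd []
      simp [hv]
    · simp [h]
  rw [List.map_congr_left hid, List.map_id]

-- the gap-fill loop appends the missing keys with []
theorem pv_gapfill (js : List Int) (dd : PySem.Dict Int (List (List Int)))
    (hnd : dd.keys.Nodup) (hjs : js.Nodup) :
    (js.foldl (fun dd j => dd.insert j (dd.getD j [])) dd).items
      = dd.items ++ (js.filter (fun j => !dd.contains j)).map
          (fun j => (j, ([] : List (List Int)))) := by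
  induction js generalizing dd with
  | nil => simp
  | cons j t ih =>
    obtain ⟨hj, ht⟩ := List.nodup_cons.mp hjs
    rw [List.foldl_cons, List.filter_cons]
    by_cases hc : dd.contains j = true
    · rw [pv_insert_getD_self dd j hnd hc, ih dd hnd ht]
      simp [hc]
    · have hc' : dd.contains j = false := by simpa using hc
      rw [PySem.Dict.getD_of_not_contains dd [] hc']
      rw [ih _ (PySem.Dict.nodup_keys_insert dd j [] hnd) ht]
      rw [PySem.Dict.items_insert_of_not_contains dd [] hc']
      have hfilter : t.filter (fun i => !(dd.insert j []).contains i)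
          = t.filter (fun i => !dd.contains i) := by
        apply List.filter_congr
        intro i hi
        have hij : (i == j) = false := by
          simp only [beq_eq_false_iff_ne]
          exact fun h => hj (h ▸ hi)
        rw [PySem.Dict.contains_insert, hij]
        simp
      rw [hfilter]
      simp [hc']

theorem pv_range_nodup (a b : Int) : (PySem.List.pyRange a b (-1)).Nodup := by
  rw [PySem.List.pyRange_neg_one_eq_reverse]
  exact List.nodup_reverse.mpr (PySem.List.nodup_pyRange_one _ _)

-- evaluating port A on a nonempty input
theorem pv_A_eval (S : List (List Int)) (r : List Int) (d : Int) (rest : List Int)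
    (hp : pvPresent S r = d :: rest)
    (h0 : (0 : Int) ∈ pvPresent S r ∨
      (0 : Int) ∈ (PySem.List.pyRange d (-1) (-1)).filter
        (fun j => !PySem.Set.contains (PySem.Set.ofList (List.map (fun s => hamming_distance_alt s r) S)) j)) :
    get_stage_server S r
      = ((pvPresent S r).map (fun k => (k, pvBucket S r k))
          ++ ((PySem.List.pyRange d (-1) (-1)).filter
              (fun j => !PySem.Set.contains (PySem.Set.ofList (List.map (fun s => hamming_distance_alt s r) S)) j)).map
            (fun j => (j, ([] : List (List Int))))).map
          (fun p => if (p.1 == 0) = true then ((0 : Int), [r]) else p) := by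
  simp only [get_stage_server]
  have hfoldfn : (fun (dd : PySem.Dict Int (List (List Int))) s =>
        dd.modify (hamming_distance s r) [] (· ++ [s]))
      = (fun dd s => dd.modify (hamming_distance_alt s r) [] (· ++ [s])) := by
    funext dd s; rw [pv_hd_eq]
  rw [hfoldfn]
  set D : PySem.Dict Int (List (List Int)) := PySem.Dict.ofList
    (PySem.List.sorted
      ((S.foldl (fun dd s => dd.modify (hamming_distance_alt s r) [] (· ++ [s]))
        (PySem.Dict.empty : PySem.Dict Int (List (List Int)))).items)
      (fun x => x.1) true) with hD
  have hitems1 : D.items = (pvPresent S r).map (fun k => (k, pvBucket S r k)) := by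
    rw [hD, pv_sorted_items]
    apply pv_ofList_items
    have : ((pvPresent S r).map (fun k => (k, pvBucket S r k))).map (fun p => p.1)
        = pvPresent S r := by
      rw [List.map_map]; simp [Function.comp_def]
    rw [this]
    exact pv_present_nodup S r
  have hkeys1 : D.keys = pvPresent S r := by
    simp only [PySem.Dict.keys]
    rw [hitems1, List.map_map]; simp [Function.comp_def]
  have hnd1 : D.keys.Nodup := by rw [hkeys1]; exact pv_present_nodup S r
  have hcontfilter : (PySem.List.pyRange d (-1) (-1)).filter (fun j => !D.contains j)
      = (PySem.List.pyRange d (-1) (-1)).filter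
        (fun j => !PySem.Set.contains (PySem.Set.ofList (List.map (fun s => hamming_distance_alt s r) S)) j) := by
    apply List.filter_congr
    intro j _
    have h1 : D.contains j
        = PySem.Set.contains (PySem.Set.ofList (List.map (fun s => hamming_distance_alt s r) S)) j := by
      rw [PySem.Dict.contains_eq_decide_mem_keys, hkeys1]
      apply Bool.eq_iff_iff.mpr
      simp only [decide_eq_true_eq, PySem.Set.contains_eq_listContains,
        List.contains_iff_mem, PySem.Set.mem_ofList]
      exact pv_mem_present S r j
    rw [h1]
  have hc0 : ((PySem.List.pyRange d (-1) (-1)).foldl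
      (fun dd j => dd.insert j (dd.getD j [])) D).contains 0 = true := by
    rw [PySem.Dict.contains_iff_mem_keys]
    simp only [PySem.Dict.keys]
    rw [pv_gapfill _ _ hnd1 (pv_range_nodup d (-1)), hitems1, hcontfilter]
    simp only [List.map_append, List.map_map, List.mem_append]
    simpa using h0
  rw [hkeys1, hp]
  simp only [List.head?_cons]
  rw [PySem.Dict.items_insert_of_contains _ [r] hc0]
  rw [pv_gapfill _ _ hnd1 (pv_range_nodup d (-1)), hitems1, hcontfilter, hp]

-- the zip-filter bucket is the direct filter
theorem pv_zip_bucket (S : List (List Int)) (r : List Int) (k : Int) :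
    ((S.zip (S.map (fun s => hamming_distance_alt s r))).filter (fun p => p.2 == k)).map
        (fun p => p.1)
      = S.filter (fun s => hamming_distance_alt s r == k) := by
  induction S with
  | nil => rfl
  | cons s t ih =>
    by_cases h : (hamming_distance_alt s r == k) = true <;>
      simp [h, ih]

-- evaluating port B on a nonempty input
theorem pv_B_eval (S : List (List Int)) (r : List Int) (d : Int) (rest : List Int)
    (hp : pvPresent S r = d :: rest)
    (hkn : ((d :: rest) ++ (PySem.List.pyRange d (-1) (-1)).filter
      (fun j => !PySem.Set.contains (PySem.Set.ofList (List.map (fun s => hamming_distance_alt s r) S)) j)).Nodup) :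
    get_stage_server_alt S r
      = ((d :: rest) ++ (PySem.List.pyRange d (-1) (-1)).filter
          (fun j => !PySem.Set.contains (PySem.Set.ofList (List.map (fun s => hamming_distance_alt s r) S)) j)).map
          (fun k => (k, if k = 0 then [r]
            else S.filter (fun s => hamming_distance_alt s r == k))) := by
  simp only [get_stage_server_alt]
  rw [show PySem.List.sorted (PySem.Set.ofList (List.map (fun s => hamming_distance_alt s r) S))
      (fun x => x) true = d :: rest from hp]
  simp only [List.head?_cons]
  rw [pv_items_fresh _ _ hkn]
  simp only [pv_zip_bucket]

-- the two result lists agree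
theorem pv_final (S : List (List Int)) (r : List Int) (pres miss : List Int)
    (hb0 : ∀ j ∈ miss, j ≠ 0 →
      List.filter (fun s => hamming_distance_alt s r == j) S = []) :
    (pres.map (fun k => (k, pvBucket S r k))
        ++ miss.map (fun j => (j, ([] : List (List Int))))).map
        (fun p => if (p.1 == 0) = true then ((0 : Int), [r]) else p)
      = (pres ++ miss).map (fun k => (k, if k = 0 then [r]
          else S.filter (fun s => hamming_distance_alt s r == k))) := by
  rw [List.map_append, List.map_append, List.map_map, List.map_map]
  congr 1
  · apply List.map_congr_left
    intro k _
    by_cases hk : k = 0 <;> simp [hk, pvBucket]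
  · apply List.map_congr_left
    intro j hj
    by_cases hjz : j = 0
    · simp [hjz]
    · simp [hjz, hb0 j hj hjz]

theorem pv_main (S : List (List Int)) (r : List Int) (hS : S ≠ []) :
    get_stage_server S r = get_stage_server_alt S r := by
  have hdne : pvDists S r ≠ [] := by simp [pvDists, hS]
  have hpne : pvPresent S r ≠ [] := by
    intro h
    obtain ⟨x, hx⟩ := List.exists_mem_of_ne_nil _ hdne
    have hm := (pv_mem_present S r x).mpr hx
    rw [h] at hm
    exact List.not_mem_nil hm
  obtain ⟨d, rest, hp⟩ := List.exists_cons_of_ne_nil hpne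
  have hd_mem : d ∈ pvDists S r :=
    (pv_mem_present S r d).mp (by rw [hp]; exact List.mem_cons_self ..)
  have hd0 : 0 ≤ d := by
    obtain ⟨s, _, hs⟩ := List.mem_map.mp hd_mem
    rw [← hs]; exact pv_hd_alt_nonneg s r
  have hnotin : ∀ j : Int,
      j ∈ (PySem.List.pyRange d (-1) (-1)).filter
        (fun j => !PySem.Set.contains (PySem.Set.ofList (List.map (fun s => hamming_distance_alt s r) S)) j) →
      j ∉ pvDists S r := by
    intro j hj
    have := (List.mem_filter.mp hj).2
    simpa [PySem.Set.contains_eq_listContains, List.contains_iff_mem, PySem.Set.mem_ofList, pvDists] using this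
  have h0 : (0 : Int) ∈ pvPresent S r ∨
      (0 : Int) ∈ (PySem.List.pyRange d (-1) (-1)).filter
        (fun j => !PySem.Set.contains (PySem.Set.ofList (List.map (fun s => hamming_distance_alt s r) S)) j) := by
    by_cases hz : (0 : Int) ∈ pvDists S r
    · exact Or.inl ((pv_mem_present S r 0).mpr hz)
    · refine Or.inr (List.mem_filter.mpr ⟨PySem.List.mem_pyRange_neg_one.mpr
        ⟨by norm_num, hd0⟩, ?_⟩)
      simpa [PySem.Set.contains_eq_listContains, List.contains_iff_mem, PySem.Set.mem_ofList, pvDists] using hz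
  have hkn : ((d :: rest) ++ (PySem.List.pyRange d (-1) (-1)).filter
      (fun j => !PySem.Set.contains (PySem.Set.ofList (List.map (fun s => hamming_distance_alt s r) S)) j)).Nodup := by
    rw [← hp]
    refine (pv_present_nodup S r).append
      ((pv_range_nodup d (-1)).filter _) ?_
    intro a ha hamem
    exact hnotin a hamem ((pv_mem_present S r a).mp ha)
  have hb0 : ∀ j ∈ (PySem.List.pyRange d (-1) (-1)).filter
        (fun j => !PySem.Set.contains (PySem.Set.ofList (List.map (fun s => hamming_distance_alt s r) S)) j),
      j ≠ 0 → List.filter (fun s => hamming_distance_alt s r == j) S = [] := by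
    intro j hj _
    rw [List.filter_eq_nil_iff]
    intro s hs hbe
    exact hnotin j hj (List.mem_map.mpr ⟨s, hs, (beq_iff_eq.mp hbe).symm ▸ rfl⟩)
  rw [pv_A_eval S r d rest hp h0, pv_B_eval S r d rest hp hkn, hp]
  exact pv_final S r (d :: rest) _ hb0

-- ===== VERDICT (by name: the statement is the Claim_ definition above) =====
theorem get_stage_server_spec : Claim_equal_get_stage_server := by
  intro S r _ hpre
  exact pv_main S r hpre
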